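-- pv_equiv track=rewrite | github.com/LeeroyChangkins/ruck-item-categorization-v2 | step-2-extract-keyword-frequencies/generate_keywords_1_0.py | tokenize_letters_only
-- ===== SOURCE A (Python) =====
-- from typing import Iterable, Set
--
-- MIN_WORD_LEN = 4
--
-- def tokenize_letters_only(text: str) -> Set[str]:
--     """Return a set of lowercase letter-only tokens (A–Z runs). No regex."""
--     if not text:
--         return set()
--     s = str(text)
--     out: Set[str] = set()
--     cur: list[str] = []
--     for ch in s:
--         o = ord(ch)
--         if (65 <= o <= 90) or (97 <= o <= 122):
--             cur.append(ch)
--         else: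
--             if cur:
--                 w = "".join(cur).lower()
--                 if len(w) >= MIN_WORD_LEN:
--                     out.add(w)
--                 cur = []
--     if cur:
--         w = "".join(cur).lower()
--         if len(w) >= MIN_WORD_LEN:
--             out.add(w)
--     return out
-- ===== SOURCE B (Python) =====
-- MIN_WORD_LEN = 4
--
-- def _is_ascii_letter(ch):
--     return ('A' <= ch <= 'Z') or ('a' <= ch <= 'z')
--
-- def tokenize_letters_only(text):
--     """Two-pointer run scanner: find each maximal ASCII-letter run by index."""
--     s = str(text)
--     out = set()
--     i, n = 0, len(s)
--     while i < n:
--         j = i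
--         while j < n and _is_ascii_letter(s[j]):
--             j += 1
--         if j > i:
--             if j - i >= MIN_WORD_LEN:
--                 out.add(s[i:j].lower())
--             i = j
--         else:
--             i += 1
--     return out
-- ===== Notes on version B (the rewrite author's own statement) =====
-- stated objective: alternative
-- what changed: Replaces the per-character fold with a growing `cur` buffer and end-of-string flush by a two-pointer index scan that locates each maximal letter run with an inner advance and slices it out directly.
import Mathlib
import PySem

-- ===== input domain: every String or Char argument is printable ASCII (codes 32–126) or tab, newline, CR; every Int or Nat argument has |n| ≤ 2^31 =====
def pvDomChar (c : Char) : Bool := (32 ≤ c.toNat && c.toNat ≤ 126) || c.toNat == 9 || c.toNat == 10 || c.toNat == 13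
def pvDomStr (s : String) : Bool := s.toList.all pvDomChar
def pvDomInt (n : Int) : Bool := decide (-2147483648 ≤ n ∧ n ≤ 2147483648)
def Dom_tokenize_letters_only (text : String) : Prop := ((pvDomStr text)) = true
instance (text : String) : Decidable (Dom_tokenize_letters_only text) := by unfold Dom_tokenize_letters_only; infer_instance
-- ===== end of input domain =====

-- B replaces A's per-character fold with a `cur` buffer and end-of-string flush by a
-- two-pointer index scan that slices out each maximal ASCII-letter run (alternative decomposition).
-- The Python result is a set, modelled as PySem.Set String (first-insertion order).

-- ===== PORT A =====
-- (65 <= o <= 90) or (97 <= o <= 122)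
def pvAIsLet (c : Char) : Bool := (65 ≤ c.toNat && c.toNat ≤ 90) || (97 ≤ c.toNat && c.toNat ≤ 122)

-- A's `if cur: w = "".join(cur).lower(); if len(w) >= MIN_WORD_LEN: out.add(w)`
-- (identity on empty cur, so it also covers the else-branch's `cur = []` when cur is already empty)
def pvAFlush (out : List String) (cur : List Char) : List String :=
  if cur.isEmpty then out
  else
    let w := PySem.Str.lower (String.ofList cur)
    if 4 ≤ PySem.Str.len w then PySem.Set.add out w else out

-- the body of A's `for ch in s` loop, state = (out, cur)
def pvAStep (st : List String × List Char) (ch : Char) : List String × List Char :=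
  if pvAIsLet ch then (st.1, st.2 ++ [ch]) else (pvAFlush st.1 st.2, [])

def tokenize_letters_only (text : String) : List String :=
  if text = "" then []
  else
    let st := text.toList.foldl pvAStep ([], [])
    pvAFlush st.1 st.2

-- ===== PORT B =====
-- ('A' <= ch <= 'Z') or ('a' <= ch <= 'z')
def pvBIsLet (c : Char) : Bool := ('A' ≤ c && c ≤ 'Z') || ('a' ≤ c && c ≤ 'z')

-- inner `while j < n and _is_ascii_letter(s[j]): j += 1`
def pvScanEnd (cs : List Char) (j : Nat) : Nat :=
  if h : j < cs.length then
    if pvBIsLet cs[j] then pvScanEnd cs (j + 1) else j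
  else j
termination_by cs.length - j

-- the scan end never passes the length (cited by pvBGo's termination proof)
theorem pvScanEnd_le (cs : List Char) (j : Nat) (hj : j ≤ cs.length) :
    pvScanEnd cs j ≤ cs.length := by
  fun_induction pvScanEnd cs j with
  | case1 j h hl ih => exact ih (by omega)
  | case2 j h hl => omega
  | case3 j h => omega

-- outer `while i < n` loop; s[i:j].lower() is (drop i).take (j-i) (exact: 0 ≤ i ≤ j ≤ n)
def pvBGo (cs : List Char) (i : Nat) (out : List String) : List String :=
  if h : i < cs.length then
    let j := pvScanEnd cs i
    if hj : i < j then
      pvBGo cs j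
        (if 4 ≤ j - i then
           PySem.Set.add out (PySem.Str.lower (String.ofList ((cs.drop i).take (j - i))))
         else out)
    else pvBGo cs (i + 1) out
  else out
termination_by cs.length - i
decreasing_by
  · have := pvScanEnd_le cs i (by omega); omega
  · omega

def tokenize_letters_only_alt (text : String) : List String :=
  pvBGo text.toList 0 []

-- ===== PRECONDITION & SPEC =====
def Spec_tokenize_letters_only (text : String) (out : List String) : Prop := out = tokenize_letters_only_alt text
instance (text : String) (out : List String) : Decidable (Spec_tokenize_letters_only text out) := by unfold Spec_tokenize_letters_only; infer_instance

-- ===== CLAIM (what is proved, stated in full; the proofs are below) =====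
def Claim_equal_tokenize_letters_only : Prop := ∀ (text : String), Dom_tokenize_letters_only text → Spec_tokenize_letters_only text (tokenize_letters_only text)

-- ===== LEMMAS AND PROOFS =====

theorem charLe_toNat (a c : Char) : (a ≤ c) = (a.toNat ≤ c.toNat) :=
  propext (by rw [Char.le_def, UInt32.le_iff_toNat_le]; exact Iff.rfl)

-- the two letter tests agree
theorem isLet_eq (c : Char) : pvAIsLet c = pvBIsLet c := by
  simp only [pvAIsLet, pvBIsLet, charLe_toNat]; rfl

-- emitting one run, the reference form shared by both directions
def emitRun (out : List String) (run : List Char) : List String :=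
  if 4 ≤ run.length then PySem.Set.add out (PySem.Str.lower (String.ofList run)) else out

theorem emitRun_nil (out : List String) : emitRun out [] = out := by simp [emitRun]

theorem pvAFlush_eq_emitRun (out : List String) (cur : List Char) :
    pvAFlush out cur = emitRun out cur := by
  rcases cur with _ | ⟨c, cs⟩
  · simp [pvAFlush, emitRun]
  · have hw : PySem.Str.len (PySem.Str.lower (String.ofList (c :: cs))) = ((c :: cs).length : Int) := by
      simp [PySem.Str.len_eq, PySem.Chars.lower]
    simp only [pvAFlush, emitRun, List.isEmpty_cons, Bool.false_eq_true, if_false, hw]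
    by_cases h : 4 ≤ (c :: cs).length
    · rw [if_pos (by exact_mod_cast h), if_pos h]
    · rw [if_neg (by exact_mod_cast h), if_neg h]

-- run-level reference recursion both ports are reduced to
def specRuns (cs : List Char) (out : List String) : List String :=
  match cs with
  | [] => out
  | c :: rest =>
    if pvBIsLet c then
      specRuns ((c :: rest).dropWhile pvBIsLet) (emitRun out ((c :: rest).takeWhile pvBIsLet))
    else specRuns rest out
termination_by cs.length
decreasing_by
  · simp only [List.dropWhile_cons, *, if_pos]
    have := List.length_dropWhile_le pvBIsLet rest
    simp; omega
  · simp

-- A's fold-plus-trailing-flush as a function of the loop state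
def flushFold (out : List String) (cur : List Char) (cs : List Char) : List String :=
  pvAFlush (cs.foldl pvAStep (out, cur)).1 (cs.foldl pvAStep (out, cur)).2

theorem flushFold_shift (cs : List Char) :
    ∀ (cur : List Char) (out : List String),
      flushFold out cur cs
        = flushFold (emitRun out (cur ++ cs.takeWhile pvBIsLet)) [] (cs.dropWhile pvBIsLet) := by
  induction cs with
  | nil =>
    intro cur out
    simp [flushFold, pvAFlush_eq_emitRun, emitRun_nil]
  | cons c rest ih =>
    intro cur out
    by_cases hc : pvBIsLet c
    · have hstep : pvAStep (out, cur) c = (out, cur ++ [c]) := by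
        simp [pvAStep, isLet_eq, hc]
      simp only [flushFold, List.foldl_cons, hstep]
      have h2 := ih (cur ++ [c]) out
      simp only [flushFold] at h2
      rw [h2]
      simp [hc]
    · have hstep : pvAStep (out, cur) c = (emitRun out cur, []) := by
        simp [pvAStep, isLet_eq, hc, pvAFlush_eq_emitRun]
      have hstep2 : pvAStep (emitRun out cur, []) c = (emitRun out cur, []) := by
        simp [pvAStep, isLet_eq, hc, pvAFlush_eq_emitRun, emitRun_nil]
      simp only [flushFold, List.foldl_cons, hstep, List.takeWhile_cons, List.dropWhile_cons, hc,
        Bool.false_eq_true, if_false, List.append_nil, hstep2]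

theorem flushFold_eq_specRuns (cs : List Char) (out : List String) :
    flushFold out [] cs = specRuns cs out := by
  fun_induction specRuns cs out with
  | case1 out => simp [flushFold, pvAFlush_eq_emitRun, emitRun_nil]
  | case2 out c rest hc ih =>
    rw [flushFold_shift, List.nil_append]; exact ih
  | case3 out c rest hc ih =>
    have hstep : pvAStep (out, []) c = (out, []) := by
      simp [pvAStep, isLet_eq, hc, pvAFlush]
    simp only [flushFold, List.foldl_cons, hstep]
    exact ih

theorem pvScanEnd_eq (cs : List Char) (j : Nat) :
    pvScanEnd cs j = j + ((cs.drop j).takeWhile pvBIsLet).length := by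
  fun_induction pvScanEnd cs j with
  | case1 j h hl ih =>
    have hdrop : cs.drop j = cs[j] :: cs.drop (j + 1) := List.drop_eq_getElem_cons h
    rw [hdrop, List.takeWhile_cons, if_pos hl, List.length_cons, ih]
    omega
  | case2 j h hl =>
    have hdrop : cs.drop j = cs[j] :: cs.drop (j + 1) := List.drop_eq_getElem_cons h
    rw [hdrop, List.takeWhile_cons, if_neg (by simp [hl])]
    simp
  | case3 j h =>
    rw [List.drop_eq_nil_of_le (by omega)]
    simp

theorem drop_len_takeWhile {α : Type} (p : α → Bool) (l : List α) :
    l.drop (l.takeWhile p).length = l.dropWhile p := by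
  induction l with
  | nil => simp
  | cons a l ih => by_cases pa : p a <;> simp [pa, ih]

theorem specRuns_cons_pos (c : Char) (rest : List Char) (out : List String)
    (hc : pvBIsLet c = true) :
    specRuns (c :: rest) out
      = specRuns ((c :: rest).dropWhile pvBIsLet) (emitRun out ((c :: rest).takeWhile pvBIsLet)) := by
  rw [specRuns, if_pos hc]

theorem specRuns_cons_neg (c : Char) (rest : List Char) (out : List String)
    (hc : pvBIsLet c = false) :
    specRuns (c :: rest) out = specRuns rest out := by
  rw [specRuns, if_neg (by simp [hc])]

theorem pvBGo_eq_specRuns (cs : List Char) (i : Nat) (out : List String) :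
    pvBGo cs i out = specRuns (cs.drop i) out := by
  fun_induction pvBGo cs i out with
  | case1 i out h j hj ih =>
    have hje : j = i + ((cs.drop i).takeWhile pvBIsLet).length := pvScanEnd_eq cs i
    have hdrop : cs.drop i = cs[i] :: cs.drop (i + 1) := List.drop_eq_getElem_cons h
    have hc : pvBIsLet cs[i] = true := by
      by_contra hcn
      have h0 : (cs.drop i).takeWhile pvBIsLet = [] := by
        rw [hdrop, List.takeWhile_cons, if_neg (by simpa using hcn)]
      rw [h0] at hje; simp at hje; omega
    have hlen : j - i = ((cs.drop i).takeWhile pvBIsLet).length := by omega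
    have htake : ((cs.drop i).take (j - i)) = (cs.drop i).takeWhile pvBIsLet := by
      have hpre : (cs.drop i).takeWhile pvBIsLet <+: cs.drop i := List.takeWhile_prefix _
      rw [hlen]
      exact (List.prefix_iff_eq_take.mp hpre).symm
    have hdropj : cs.drop j = (cs.drop i).dropWhile pvBIsLet := by
      rw [hje, ← List.drop_drop, drop_len_takeWhile]
    have hemit : (if 4 ≤ j - i then
           PySem.Set.add out (PySem.Str.lower (String.ofList ((cs.drop i).take (j - i))))
         else out) = emitRun out ((cs.drop i).takeWhile pvBIsLet) := by
      rw [htake, hlen, emitRun]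
    simp only [dite_eq_ite] at ih
    rw [hemit] at ih ⊢
    rw [ih, hdropj]
    conv_rhs => rw [hdrop]
    rw [specRuns_cons_pos _ _ _ hc, ← hdrop]
  | case2 i out h j hj ih =>
    have hje : j = i + ((cs.drop i).takeWhile pvBIsLet).length := pvScanEnd_eq cs i
    have hdrop : cs.drop i = cs[i] :: cs.drop (i + 1) := List.drop_eq_getElem_cons h
    have hc : pvBIsLet cs[i] = false := by
      by_contra hcn
      have hct : pvBIsLet cs[i] = true := by simpa using hcn
      have h1 : (cs.drop i).takeWhile pvBIsLet
          = cs[i] :: ((cs.drop (i+1)).takeWhile pvBIsLet) := by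
        rw [hdrop, List.takeWhile_cons, if_pos hct]
      rw [h1] at hje; simp at hje; omega
    rw [ih]
    conv_rhs => rw [hdrop]
    rw [specRuns_cons_neg _ _ _ hc]
  | case3 i out h =>
    rw [List.drop_eq_nil_of_le (by omega), specRuns]

-- ===== VERDICT (by name: the statement is the Claim_ definition above) =====
theorem tokenize_letters_only_spec : Claim_equal_tokenize_letters_only := by
  intro text _
  unfold Spec_tokenize_letters_only tokenize_letters_only tokenize_letters_only_alt
  rw [pvBGo_eq_specRuns, List.drop_zero]
  by_cases h : text = ""
  · subst h
    rw [if_pos rfl, show ("" : String).toList = [] from rfl, specRuns]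
  · rw [if_neg h]
    exact flushFold_eq_specRuns text.toList []
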